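-- pv_equiv track=rewrite | github.com/rd11490/owcs | explore/plot_match.py | build_map_diff_dict
-- ===== SOURCE A (Python) =====
-- def build_map_diff_dict(maps_to_win):
--     possible_loser_scores = list(range(0, maps_to_win))
--     combos = []
--     dict = {}
--     for score in possible_loser_scores:
--         combos.append(score - maps_to_win)
--         combos.append(maps_to_win - score)
--     combos.sort()
--     for c in combos:
--         dict[c] = 0
--     return dict
-- ===== SOURCE B (Python) =====
-- def build_map_diff_dict(maps_to_win):
--     return {d: 0 for d in range(-maps_to_win, maps_to_win + 1) if d != 0}
-- ===== Notes on version B (the rewrite author's own statement) =====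
-- stated objective: simpler
-- what changed: B emits the keys -n..-1,1..n directly as one closed-form range comprehension, with no intermediate combos list, no sort and no second dict-filling loop.
import Mathlib
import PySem

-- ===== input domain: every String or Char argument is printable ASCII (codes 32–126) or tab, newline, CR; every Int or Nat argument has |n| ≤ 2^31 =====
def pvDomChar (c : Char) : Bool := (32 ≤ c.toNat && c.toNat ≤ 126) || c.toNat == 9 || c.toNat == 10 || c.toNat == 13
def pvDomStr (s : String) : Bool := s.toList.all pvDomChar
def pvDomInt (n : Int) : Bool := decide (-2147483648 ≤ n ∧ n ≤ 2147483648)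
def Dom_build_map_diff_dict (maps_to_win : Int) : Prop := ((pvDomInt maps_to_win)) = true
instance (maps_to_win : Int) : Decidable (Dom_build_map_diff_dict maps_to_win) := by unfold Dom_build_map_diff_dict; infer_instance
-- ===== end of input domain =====

-- B replaces A's build-pairs/sort/refill-dict pipeline by one closed-form range comprehension (objective: simpler).

-- ===== PORT A =====
def build_map_diff_dict (maps_to_win : Int) : List (Int × Int) :=
  let possible_loser_scores := PySem.List.pyRange 0 maps_to_win 1
  let combos := possible_loser_scores.foldl
    (fun acc score => (acc ++ [score - maps_to_win]) ++ [maps_to_win - score]) []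
  let combos := PySem.List.sorted combos (fun x => x) false
  let d := combos.foldl (fun (d : PySem.Dict Int Int) c => d.insert c 0) PySem.Dict.empty
  d.items

-- ===== PORT B =====
def build_map_diff_dict_alt (maps_to_win : Int) : List (Int × Int) :=
  ((PySem.List.pyRange (-maps_to_win) (maps_to_win + 1) 1).filter (fun d => d != 0)).map
    (fun d => (d, 0))

-- ===== PRECONDITION & SPEC =====
def Spec_build_map_diff_dict (maps_to_win : Int) (out : List (Int × Int)) : Prop := out = build_map_diff_dict_alt maps_to_win
instance (maps_to_win : Int) (out : List (Int × Int)) : Decidable (Spec_build_map_diff_dict maps_to_win out) := by unfold Spec_build_map_diff_dict; infer_instance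

-- ===== CLAIM (what is proved, stated in full; the proofs are below) =====
def Claim_equal_build_map_diff_dict : Prop := ∀ (maps_to_win : Int), Dom_build_map_diff_dict maps_to_win → Spec_build_map_diff_dict maps_to_win (build_map_diff_dict maps_to_win)

-- ===== LEMMAS AND PROOFS =====

-- A's first loop builds the flatMap of [s-n, n-s].
theorem combos_foldl_eq (n : Int) (l : List Int) (init : List Int) :
    l.foldl (fun acc s => (acc ++ [s - n]) ++ [n - s]) init
      = init ++ l.flatMap (fun s => [s - n, n - s]) := by
  induction l generalizing init with
  | nil => simp
  | cons a t ih => simp [List.flatMap]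

theorem flatMap_pair_perm {a b : Type} (f g : a -> b) (l : List a) :
    (l.flatMap (fun s => [f s, g s])).Perm (l.map f ++ l.map g) := by
  induction l with
  | nil => simp
  | cons x t ih =>
    simp only [List.flatMap_cons, List.map_cons, List.cons_append]
    exact (((ih.cons (g x)).trans List.perm_middle.symm).cons (f x))

theorem map_sub_pyRange (n : Int) :
    (PySem.List.pyRange 0 n 1).map (fun s => s - n) = PySem.List.pyRange (-n) 0 1 := by
  rw [PySem.List.pyRange_one, PySem.List.pyRange_one, List.map_map]
  have h : (0 : Int) - -n = n - 0 := by ring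
  rw [h]
  apply List.map_congr_left
  intro k _
  simp only [Function.comp_apply]
  ring

theorem map_rsub_pyRange (n : Int) :
    (PySem.List.pyRange 0 n 1).map (fun s => n - s) = PySem.List.pyRange n 0 (-1) := by
  rw [PySem.List.pyRange_one, PySem.List.pyRange_neg_one, List.map_map]
  apply List.map_congr_left
  intro k _
  simp only [Function.comp_apply]
  ring

-- the strictly increasing target list
theorem target_pairwise (n : Int) :
    (PySem.List.pyRange (-n) 0 1 ++ PySem.List.pyRange 1 (n + 1) 1).Pairwise (· < ·) := by
  refine List.pairwise_append.2 ⟨PySem.List.pairwise_lt_pyRange_one _ _,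
    PySem.List.pairwise_lt_pyRange_one _ _, ?_⟩
  intro x hx y hy
  have hx' := (PySem.List.mem_pyRange_one.1 hx).2
  have hy' := (PySem.List.mem_pyRange_one.1 hy).1
  omega

theorem combos_sorted (n : Int) :
    PySem.List.sorted ((PySem.List.pyRange 0 n 1).flatMap (fun s => [s - n, n - s]))
        (fun x => x) false
      = PySem.List.pyRange (-n) 0 1 ++ PySem.List.pyRange 1 (n + 1) 1 := by
  apply PySem.List.sorted_eq_of_perm_of_pairwise_lt
  · have p1 : (PySem.List.pyRange (-n) 0 1 ++ PySem.List.pyRange 1 (n + 1) 1).Perm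
        (PySem.List.pyRange (-n) 0 1 ++ (PySem.List.pyRange 1 (n + 1) 1).reverse) :=
      ((List.reverse_perm _).symm).append_left _
    have p2 : PySem.List.pyRange (-n) 0 1 ++ (PySem.List.pyRange 1 (n + 1) 1).reverse
        = (PySem.List.pyRange 0 n 1).map (fun s => s - n)
            ++ (PySem.List.pyRange 0 n 1).map (fun s => n - s) := by
      rw [map_sub_pyRange, map_rsub_pyRange, PySem.List.pyRange_neg_one_eq_reverse]
      norm_num
    have p3 : ((PySem.List.pyRange 0 n 1).map (fun s => s - n)
            ++ (PySem.List.pyRange 0 n 1).map (fun s => n - s)).Perm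
        ((PySem.List.pyRange 0 n 1).flatMap (fun s => [s - n, n - s])) :=
      (flatMap_pair_perm _ _ _).symm
    exact p1.trans (p2 ▸ p3)
  · exact target_pairwise n

-- filling an empty dict with pairwise-distinct keys just lists the pairs
theorem dict_fill (L : List Int) (d : PySem.Dict Int Int)
    (h : ∀ k ∈ L, d.contains k = false) (hnd : L.Nodup) :
    (L.foldl (fun (d : PySem.Dict Int Int) c => d.insert c 0) d).items
      = d.items ++ L.map (fun c => (c, 0)) := by
  induction L generalizing d with
  | nil => simp
  | cons a t ih =>
    simp only [List.foldl_cons, List.map_cons]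
    rw [ih]
    · rw [PySem.Dict.items_insert_of_not_contains _ _ (h a (by simp))]
      simp
    · intro k hk
      rw [PySem.Dict.contains_insert]
      have hka : k ≠ a := fun he => (List.nodup_cons.1 hnd).1 (he ▸ hk)
      simp [hka, h k (by simp [hk])]
    · exact (List.nodup_cons.1 hnd).2

-- B's filtered range splits into the two strictly-signed ranges
theorem alt_range_split (n : Int) (hn : 0 < n) :
    (PySem.List.pyRange (-n) (n + 1) 1).filter (fun d => d != 0)
      = PySem.List.pyRange (-n) 0 1 ++ PySem.List.pyRange 1 (n + 1) 1 := by
  rw [PySem.List.pyRange_one_append (-n) 0 (n + 1) (by omega) (by omega),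
      PySem.List.pyRange_one_append 0 1 (n + 1) (by omega) (by omega),
      (by decide : PySem.List.pyRange (0 : Int) 1 = [0])]
  rw [List.filter_append, List.filter_append]
  have h1 : (PySem.List.pyRange (-n) 0 1).filter (fun d => d != 0)
      = PySem.List.pyRange (-n) 0 1 := by
    apply List.filter_eq_self.2
    intro x hx
    have := (PySem.List.mem_pyRange_one.1 hx).2
    simp only [bne_iff_ne, ne_eq]
    omega
  have h2 : (PySem.List.pyRange 1 (n + 1) 1).filter (fun d => d != 0)
      = PySem.List.pyRange 1 (n + 1) 1 := by
    apply List.filter_eq_self.2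
    intro x hx
    have := (PySem.List.mem_pyRange_one.1 hx).1
    simp only [bne_iff_ne, ne_eq]
    omega
  simp [h1, h2]

theorem main_eq (n : Int) : build_map_diff_dict n = build_map_diff_dict_alt n := by
  unfold build_map_diff_dict build_map_diff_dict_alt
  by_cases hn : 0 < n
  · simp only [combos_foldl_eq, List.nil_append, combos_sorted, alt_range_split n hn]
    rw [dict_fill _ _ (by simp [PySem.Dict.empty]) ((target_pairwise n).nodup)]
    simp [PySem.Dict.empty]
  · by_cases h0 : n = 0
    · subst h0; decide
    · simp only [PySem.List.pyRange_one_eq_nil (by omega : n ≤ (0 : Int)),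
        PySem.List.pyRange_one_eq_nil (by omega : n + 1 ≤ -n), List.foldl_nil,
        List.filter_nil, List.map_nil]
      rw [PySem.List.sorted_eq_of_perm_of_pairwise_lt _ [] _ (by simp) (by simp)]
      simp [PySem.Dict.empty]

-- ===== VERDICT (by name: the statement is the Claim_ definition above) =====
theorem build_map_diff_dict_spec : Claim_equal_build_map_diff_dict := by
  intro n _
  exact main_eq n
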